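-- pv_equiv track=rewrite | github.com/faraonc/Data-Analysis-Automation-Sprint-Internship | process_stream_list.py | groupStreams
-- ===== SOURCE A (Python) =====
-- def groupStreams(streams):
-- 	tmp_groups = []
-- 	tmp_set = []
--
-- 	length = 0
-- 	for stream in streams:
-- 		length += 1
-- 		if not tmp_set:
-- 			tmp_set.append(stream)
-- 		else:
-- 			if abs(int(stream) - int(tmp_set[-1])) <= 10 and length != len(streams):
-- 				tmp_set.append(stream)
-- 			elif abs(int(stream) - int(tmp_set[-1])) <= 10 and length == len(streams):
-- 				tmp_set.append(stream)
-- 				tmp_groups.append(tmp_set[:])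
-- 			elif length == len(streams):
-- 				tmp_groups.append(tmp_set[:])
-- 				del tmp_set[:]
-- 				tmp_set.append(stream)
-- 				tmp_groups.append(tmp_set[:])
-- 			else:
-- 				tmp_groups.append(tmp_set[:])
-- 				del tmp_set[:]
-- 				tmp_set.append(stream)
--
-- 	return tmp_groups
-- ===== SOURCE B (Python) =====
-- def groupStreams(streams):
-- 	groups = []
-- 	cur = []
-- 	for a, b in zip(streams, streams[1:]):
-- 		if not cur:
-- 			cur = [a]
-- 		if abs(int(b) - int(a)) <= 10:
-- 			cur.append(b)
-- 		else:
-- 			groups.append(cur)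
-- 			cur = [b]
-- 	if cur:
-- 		groups.append(cur)
-- 	return groups
-- ===== Notes on version B (the rewrite author's own statement) =====
-- stated objective: simpler
-- what changed: Replaces A's position-counter scan with a four-way branch on whether the current element is the last by a pairwise zip(streams, streams[1:]) pass with lazy group initialisation and a single final flush, which reproduces the no-group-for-singleton behaviour with no special case.
import Mathlib
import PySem

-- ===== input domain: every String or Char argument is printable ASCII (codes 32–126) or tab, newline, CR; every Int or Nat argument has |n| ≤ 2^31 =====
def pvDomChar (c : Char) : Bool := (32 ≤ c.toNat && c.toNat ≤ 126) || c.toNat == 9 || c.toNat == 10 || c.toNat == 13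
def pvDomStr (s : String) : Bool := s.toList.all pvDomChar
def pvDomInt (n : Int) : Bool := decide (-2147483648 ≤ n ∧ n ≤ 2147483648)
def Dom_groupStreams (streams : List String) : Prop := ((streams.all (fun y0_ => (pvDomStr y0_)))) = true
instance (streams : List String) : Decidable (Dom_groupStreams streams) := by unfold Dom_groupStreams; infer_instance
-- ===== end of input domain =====

-- B replaces A's position-counter scan with four-way last-element branching by a pairwise
-- zip(streams, streams[1:]) pass with lazy group initialisation (objective: simpler).

-- int(s); exact on the inputs Pre_ admits, where ofStr? is some (Pre_ excludes ValueError inputs)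
def pvIntD (s : String) : Int := (PySem.Int.ofStr? s).getD 0

-- ===== PORT A =====
def groupStreamsStep (n : Int) (st : List (List String) × List String × Int) (stream : String) :
    List (List String) × List String × Int :=
  let groups := st.1
  let tset := st.2.1
  let length := st.2.2 + 1
  if tset.isEmpty then (groups, tset ++ [stream], length)
  else
    -- tmp_set[-1]: tset is nonempty on this branch, so getLast?.getD "" is exact
    let d := |pvIntD stream - pvIntD ((tset.getLast?).getD "")|
    if d ≤ 10 ∧ length ≠ n then (groups, tset ++ [stream], length)
    else if d ≤ 10 ∧ length = n then (groups ++ [tset ++ [stream]], tset ++ [stream], length)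
    else if length = n then (groups ++ [tset, [stream]], [stream], length)
    else (groups ++ [tset], [stream], length)

def groupStreams (streams : List String) : List (List String) :=
  (streams.foldl (groupStreamsStep (streams.length : Int)) ([], [], 0)).1

-- ===== PORT B =====
def groupStreamsAltStep (st : List (List String) × List String) (ab : String × String) :
    List (List String) × List String :=
  let cur := if st.2.isEmpty then [ab.1] else st.2
  if |pvIntD ab.2 - pvIntD ab.1| ≤ 10 then (st.1, cur ++ [ab.2])
  else (st.1 ++ [cur], [ab.2])

-- final 'if cur: groups.append(cur)'
def pvFinish (st : List (List String) × List String) : List (List String) :=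
  if st.2.isEmpty then st.1 else st.1 ++ [st.2]

def groupStreams_alt (streams : List String) : List (List String) :=
  pvFinish ((streams.zip (PySem.List.slice streams (some 1) none)).foldl groupStreamsAltStep ([], []))

-- ===== PRECONDITION & SPEC =====
-- Pre_ excludes exactly the inputs where A raises ValueError: with ≥ 2 elements, every element
-- is passed to int(), so all must parse (with ≤ 1 elements int() is never called).
def Pre_groupStreams (streams : List String) : Prop :=
  streams.length ≤ 1 ∨ ∀ s ∈ streams, (PySem.Int.ofStr? s).isSome
instance (streams : List String) : Decidable (Pre_groupStreams streams) := by
  unfold Pre_groupStreams; infer_instance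

def pvWitness_groupStreams : List String := ["1", " 5 ", "20", "+25", "-3"]

def Spec_groupStreams (streams : List String) (out : List (List String)) : Prop := out = groupStreams_alt streams
instance (streams : List String) (out : List (List String)) : Decidable (Spec_groupStreams streams out) := by unfold Spec_groupStreams; infer_instance

-- ===== CLAIM (what is proved, stated in full; the proofs are below) =====
def Claim_equal_groupStreams : Prop := ∀ (streams : List String), Dom_groupStreams streams → Pre_groupStreams streams → Spec_groupStreams streams (groupStreams streams)

-- ===== LEMMAS AND PROOFS =====

-- reference grouping: cur is the current (nonempty) group, its last element is the previous stream
def pvGo (cur : List String) : List String → List (List String)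
  | [] => [cur]
  | b :: rest =>
    if |pvIntD b - pvIntD ((cur.getLast?).getD "")| ≤ 10 then pvGo (cur ++ [b]) rest
    else cur :: pvGo [b] rest

def pvPairs (prev : String) : List String → List (String × String)
  | [] => []
  | b :: r => (prev, b) :: pvPairs b r

theorem pvZip_eq (a : String) (r : List String) : (a :: r).zip r = pvPairs a r := by
  induction r generalizing a with
  | nil => rfl
  | cons b r ih =>
    rw [show pvPairs a (b :: r) = (a, b) :: pvPairs b r from rfl, ← ih b]
    rfl

theorem pvA_inv (n : Int) (rest : List String) :
    ∀ groups tset k, tset ≠ [] → k + (rest.length : Int) = n → rest ≠ [] →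
    (rest.foldl (groupStreamsStep n) (groups, tset, k)).1 = groups ++ pvGo tset rest := by
  induction rest with
  | nil => intro _ _ _ _ _ h; exact absurd rfl h
  | cons b rest ih =>
    intro groups tset k htne hk _
    have hempty : tset.isEmpty = false := by simpa [List.isEmpty_iff] using htne
    cases rest with
    | nil =>
      have hlast : k + 1 = n := by simp at hk; omega
      rw [List.foldl_cons, List.foldl_nil]
      by_cases hd : |pvIntD b - pvIntD ((tset.getLast?).getD "")| ≤ 10
      · have hstep : groupStreamsStep n (groups, tset, k) b
            = (groups ++ [tset ++ [b]], tset ++ [b], k + 1) := by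
          simp [groupStreamsStep, hempty, hd, hlast]
        rw [hstep]; simp [pvGo, hd]
      · have hstep : groupStreamsStep n (groups, tset, k) b
            = (groups ++ [tset, [b]], [b], k + 1) := by
          simp [groupStreamsStep, hempty, hd, hlast]
        rw [hstep]; simp [pvGo, hd]
    | cons c rest' =>
      have hne : ¬ (k + 1 = n) := by simp at hk ⊢; omega
      rw [List.foldl_cons]
      by_cases hd : |pvIntD b - pvIntD ((tset.getLast?).getD "")| ≤ 10
      · have hstep : groupStreamsStep n (groups, tset, k) b = (groups, tset ++ [b], k + 1) := by
          simp [groupStreamsStep, hempty, hd, hne]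
        rw [hstep, ih groups (tset ++ [b]) (k + 1) (by simp) (by simp at hk ⊢; omega) (by simp)]
        simp [pvGo, hd]
      · have hstep : groupStreamsStep n (groups, tset, k) b = (groups ++ [tset], [b], k + 1) := by
          simp [groupStreamsStep, hempty, hd, hne]
        rw [hstep, ih (groups ++ [tset]) [b] (k + 1) (by simp) (by simp at hk ⊢; omega) (by simp)]
        simp [pvGo, hd]

theorem pvB_inv (rest : List String) :
    ∀ prev cur groups, cur ≠ [] → (cur.getLast?).getD "" = prev →
    pvFinish ((pvPairs prev rest).foldl groupStreamsAltStep (groups, cur)) = groups ++ pvGo cur rest := by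
  induction rest with
  | nil =>
    intro prev cur groups hcur _
    have hempty : cur.isEmpty = false := by simpa [List.isEmpty_iff] using hcur
    simp [pvPairs, pvGo, pvFinish, hempty]
  | cons b r ih =>
    intro prev cur groups hcur hprev
    have hempty : cur.isEmpty = false := by simpa [List.isEmpty_iff] using hcur
    rw [show pvPairs prev (b :: r) = (prev, b) :: pvPairs b r from rfl, List.foldl_cons]
    by_cases hd : |pvIntD b - pvIntD prev| ≤ 10
    · have hstep : groupStreamsAltStep (groups, cur) (prev, b) = (groups, cur ++ [b]) := by
        simp [groupStreamsAltStep, hempty, hd]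
      rw [hstep, ih b (cur ++ [b]) groups (by simp) (by simp)]
      simp [pvGo, hprev, hd]
    · have hstep : groupStreamsAltStep (groups, cur) (prev, b) = (groups ++ [cur], [b]) := by
        simp [groupStreamsAltStep, hempty, hd]
      rw [hstep, ih b [b] (groups ++ [cur]) (by simp) (by simp)]
      simp [pvGo, hprev, hd]

-- ===== VERDICT (by name: the statement is the Claim_ definition above) =====
theorem groupStreams_spec : Claim_equal_groupStreams := by
  intro streams _ _
  unfold Spec_groupStreams
  match streams with
  | [] => rfl
  | [a] => rfl
  | a :: b :: r =>
    have hA : groupStreams (a :: b :: r) = pvGo [a] (b :: r) := by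
      unfold groupStreams
      rw [List.foldl_cons,
        show groupStreamsStep ((a :: b :: r).length : Int) ([], [], 0) a
          = ([], [a], 1) from rfl,
        pvA_inv ((a :: b :: r).length : Int) (b :: r) [] [a] 1 (by simp)
          (by simp; omega) (by simp)]
      simp
    have hB : groupStreams_alt (a :: b :: r) = pvGo [a] (b :: r) := by
      unfold groupStreams_alt
      rw [PySem.List.slice_from_one,
        show (a :: b :: r).tail = b :: r from rfl, pvZip_eq,
        show pvPairs a (b :: r) = (a, b) :: pvPairs b r from rfl, List.foldl_cons]
      by_cases hd : |pvIntD b - pvIntD a| ≤ 10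
      · have hstep : groupStreamsAltStep ([], []) (a, b) = ([], [a, b]) := by
          simp [groupStreamsAltStep, hd]
        rw [hstep, pvB_inv r b [a, b] [] (by simp) (by simp)]
        simp [pvGo, hd]
      · have hstep : groupStreamsAltStep ([], []) (a, b) = ([[a]], [b]) := by
          simp [groupStreamsAltStep, hd]
        rw [hstep, pvB_inv r b [b] [[a]] (by simp) (by simp)]
        simp [pvGo, hd]
    rw [hA, hB]
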